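-- pv_equiv track=rewrite | github.com/waseem-rgb/clinova | backend/app/rag/extractors/drug_details_extractor.py | _format_dosing_bullets
-- ===== SOURCE A (Python) =====
-- from typing import Any, Dict, List, Optional, Tuple
--
-- def _format_dosing_bullets(dosing_table: List[Dict[str, Any]]) -> List[str]:
--     """Format dosing table entries as bullet points."""
--     bullets = []
--     for row in dosing_table:
--         indication = row.get("indication") or ""
--         dose = row.get("dose") or ""
--         route = row.get("route") or ""
--         frequency = row.get("frequency") or ""
--         duration = row.get("duration") or ""
--         notes = row.get("notes") or ""
--
--         parts = []
--         if indication: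
--             parts.append(f"For {indication}:")
--         if dose:
--             parts.append(dose)
--         if route:
--             parts.append(route)
--         if frequency:
--             parts.append(frequency)
--         if duration:
--             parts.append(f"for {duration}")
--         if notes:
--             parts.append(f"({notes})")
--
--         if parts:
--             bullets.append(" ".join(parts))
--
--     return bullets or ["Not found in sources"]
-- ===== SOURCE B (Python) =====
-- # Alternative decomposition: no parts list and no join -- each bullet is built
-- # directly by a right-recursion over the field specs that glues head and tail
-- # with a space only when both are nonempty; rows are staged map-then-filter.
-- _FIELDS = (
--     ("indication", "For {}:"),
--     ("dose", "{}"),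
--     ("route", "{}"),
--     ("frequency", "{}"),
--     ("duration", "for {}"),
--     ("notes", "({})"),
-- )
--
-- def _bullet(row, fields=_FIELDS):
--     if not fields:
--         return ""
--     (key, fmt), rest = fields[0], fields[1:]
--     val = row.get(key) or ""
--     head = fmt.format(val) if val else ""
--     tail = _bullet(row, rest)
--     if head and tail:
--         return head + " " + tail
--     return head or tail
--
-- def _format_dosing_bullets(dosing_table):
--     bullets = [b for b in (_bullet(row) for row in dosing_table) if b]
--     return bullets if bullets else ["Not found in sources"]
-- ===== Notes on version B (the rewrite author's own statement) =====
-- stated objective: alternative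
-- what changed: Removes A's per-row parts-list plus ' '.join accumulation: B builds each bullet directly by a right-recursion over a field-spec list that glues head and tail with a space only when both are nonempty, and stages rows as map-then-filter instead of A's conditional-append loop.
import Mathlib
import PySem

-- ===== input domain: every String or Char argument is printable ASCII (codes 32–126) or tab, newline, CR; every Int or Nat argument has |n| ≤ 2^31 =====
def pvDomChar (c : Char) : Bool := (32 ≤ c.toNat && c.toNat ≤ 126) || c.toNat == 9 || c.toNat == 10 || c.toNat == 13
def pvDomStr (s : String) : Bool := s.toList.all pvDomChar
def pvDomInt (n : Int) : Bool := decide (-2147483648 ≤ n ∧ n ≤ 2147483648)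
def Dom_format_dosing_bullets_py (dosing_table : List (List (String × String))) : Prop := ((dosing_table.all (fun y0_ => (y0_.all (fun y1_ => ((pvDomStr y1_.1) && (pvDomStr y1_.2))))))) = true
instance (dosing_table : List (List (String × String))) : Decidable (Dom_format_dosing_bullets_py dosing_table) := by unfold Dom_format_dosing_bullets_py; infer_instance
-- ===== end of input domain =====

-- B drops A's per-row parts-list + " ".join: each bullet is built directly by a right-recursion
-- over the field specs gluing head and tail with a space only when both are nonempty, and rows
-- are staged map-then-filter instead of A's conditional-append accumulator; same return value.

-- ===== PORT A =====
-- helper: the per-row parts computation (the six if-blocks of A's loop body)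
def pyRowParts (row : List (String × String)) : List String :=
  let indication := ((PySem.Dict.mk row).get? "indication").getD ""
  let dose       := ((PySem.Dict.mk row).get? "dose").getD ""
  let route      := ((PySem.Dict.mk row).get? "route").getD ""
  let frequency  := ((PySem.Dict.mk row).get? "frequency").getD ""
  let duration   := ((PySem.Dict.mk row).get? "duration").getD ""
  let notes      := ((PySem.Dict.mk row).get? "notes").getD ""
  let parts : List String := []
  let parts := if indication ≠ "" then parts ++ ["For " ++ indication ++ ":"] else parts
  let parts := if dose ≠ "" then parts ++ [dose] else parts
  let parts := if route ≠ "" then parts ++ [route] else parts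
  let parts := if frequency ≠ "" then parts ++ [frequency] else parts
  let parts := if duration ≠ "" then parts ++ ["for " ++ duration] else parts
  if notes ≠ "" then parts ++ ["(" ++ notes ++ ")"] else parts

def format_dosing_bullets_py (dosing_table : List (List (String × String))) : List String :=
  let bullets := dosing_table.foldl (fun bullets row =>
    let parts := pyRowParts row
    if parts ≠ [] then bullets ++ [PySem.Str.join " " parts] else bullets) []
  if bullets = [] then ["Not found in sources"] else bullets

-- ===== PORT B =====
-- Source B's _FIELDS; the 'For {}:'-style templates are transliterated as (prefix, suffix) pairs,
-- fmt.format(val) being exactly prefix ++ val ++ suffix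
def pvFields : List (String × String × String) :=
  [("indication", "For ", ":"), ("dose", "", ""), ("route", "", ""),
   ("frequency", "", ""), ("duration", "for ", ""), ("notes", "(", ")")]

-- Source B's recursive _bullet: head or tail, glued with " " only when both nonempty
def altBullet (row : List (String × String)) : List (String × String × String) → String
  | [] => ""
  | (key, pre, suf) :: rest =>
    let val := ((PySem.Dict.mk row).get? key).getD ""
    let head := if val ≠ "" then pre ++ val ++ suf else ""
    let tail := altBullet row rest
    if head ≠ "" ∧ tail ≠ "" then head ++ " " ++ tail
    else if head ≠ "" then head else tail

def format_dosing_bullets_py_alt (dosing_table : List (List (String × String))) : List String :=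
  let bullets := (dosing_table.map (fun row => altBullet row pvFields)).filter (fun b => b ≠ "")
  if bullets = [] then ["Not found in sources"] else bullets

-- ===== PRECONDITION & SPEC =====
def Spec_format_dosing_bullets_py (dosing_table : List (List (String × String))) (out : List String) : Prop := out = format_dosing_bullets_py_alt dosing_table
instance (dosing_table : List (List (String × String))) (out : List String) : Decidable (Spec_format_dosing_bullets_py dosing_table out) := by unfold Spec_format_dosing_bullets_py; infer_instance

-- ===== CLAIM (what is proved, stated in full; the proofs are below) =====
def Claim_equal_format_dosing_bullets_py : Prop := ∀ (dosing_table : List (List (String × String))), Dom_format_dosing_bullets_py dosing_table → Spec_format_dosing_bullets_py dosing_table (format_dosing_bullets_py dosing_table)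

-- ===== LEMMAS AND PROOFS =====

-- string facts
lemma str_append_ne_empty (p q : String) (h : p ≠ "") : p ++ q ≠ "" := by
  intro hc
  apply h
  have h2 := congrArg String.toList hc
  simp at h2
  apply String.toList_injective
  simp [h2.1]

lemma join_nil : PySem.Str.join " " [] = "" := by
  simp [PySem.Str.join, PySem.Chars.join, List.intercalate]

lemma join_one (x : String) : PySem.Str.join " " [x] = x := by
  simp [PySem.Str.join, PySem.Chars.join, List.intercalate]

lemma join_cons (x y : String) (xs : List String) :
    PySem.Str.join " " (x :: y :: xs) = x ++ " " ++ PySem.Str.join " " (y :: xs) := by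
  simp [PySem.Str.join, PySem.Chars.join, List.intercalate]
  apply String.toList_injective
  simp

-- A's parts list, recast as a recursion over the same spec list B uses (proof device)
def specParts (row : List (String × String)) : List (String × String × String) → List String
  | [] => []
  | (key, pre, suf) :: rest =>
    let val := ((PySem.Dict.mk row).get? key).getD ""
    (if val ≠ "" then [pre ++ val ++ suf] else []) ++ specParts row rest

lemma pyRowParts_eq_specParts (row : List (String × String)) :
    pyRowParts row = specParts row pvFields := by
  unfold pyRowParts
  simp only [pvFields, specParts]
  split_ifs <;> simp_all

-- core invariant: B's recursive bullet IS the " "-join of A's parts, and is "" iff parts is []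
lemma altBullet_spec (row : List (String × String)) :
    ∀ fields : List (String × String × String),
      (∀ x ∈ fields, x.2.1 ≠ "" ∨ (x.2.1 = "" ∧ x.2.2 = "")) →
      altBullet row fields = PySem.Str.join " " (specParts row fields) ∧
      (specParts row fields = [] ↔ altBullet row fields = "") := by
  intro fields
  induction fields with
  | nil => intro _; exact ⟨join_nil.symm, by simp [specParts, altBullet]⟩
  | cons f rest ih =>
    intro hf
    obtain ⟨key, pre, suf⟩ := f
    have hrest := ih (fun x hx => hf x (List.mem_cons_of_mem _ hx))
    by_cases hv : ((PySem.Dict.mk row).get? key).getD "" = ""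
    · -- field absent/empty: both sides reduce to the tail
      simp only [specParts, altBullet, hv]
      simpa using hrest
    · -- field present: head is nonempty
      have hhead : (pre ++ ((PySem.Dict.mk row).get? key).getD "" ++ suf) ≠ "" := by
        rcases hf (key, pre, suf) (List.mem_cons_self) with hp | ⟨hp, hs⟩
        · exact str_append_ne_empty _ _ (str_append_ne_empty _ _ hp)
        · simp only at hp hs
          subst hp; subst hs
          simpa using hv
      by_cases ht : altBullet row rest = ""
      · -- empty tail: bullet = head, parts = [head]
        have hsp : specParts row rest = [] := hrest.2.mpr ht
        simp only [specParts, altBullet, ht, hsp]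
        simp [hv, hhead, join_one]
      · -- nonempty tail: bullet = head ++ " " ++ tail, parts = head :: parts rest
        have hsp : specParts row rest ≠ [] := fun h => ht (hrest.2.mp h)
        obtain ⟨y, ys, hys⟩ := List.exists_cons_of_ne_nil hsp
        have hsEq : specParts row ((key, pre, suf) :: rest)
            = (pre ++ ((PySem.Dict.mk row).get? key).getD "" ++ suf) :: y :: ys := by
          simp [specParts, hv, hys]
        have haEq : altBullet row ((key, pre, suf) :: rest)
            = (pre ++ ((PySem.Dict.mk row).get? key).getD "" ++ suf) ++ " " ++ altBullet row rest := by
          simp [altBullet, hv, hhead, ht]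
        have hne : (pre ++ ((PySem.Dict.mk row).get? key).getD "" ++ suf) ++ " " ++ altBullet row rest ≠ "" :=
          str_append_ne_empty _ _ (str_append_ne_empty _ _ hhead)
        constructor
        · rw [haEq, hsEq, join_cons, ← hys, ← hrest.1]
        · simp [haEq, hsEq, hne]

lemma bullet_eq (row : List (String × String)) :
    altBullet row pvFields = PySem.Str.join " " (pyRowParts row) ∧
    (pyRowParts row = [] ↔ altBullet row pvFields = "") := by
  rw [pyRowParts_eq_specParts]
  exact altBullet_spec row pvFields (by decide)

-- A's conditional-append fold over rows equals B's map-then-filter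
lemma fold_eq (rows : List (List (String × String))) :
    ∀ acc : List String,
      rows.foldl (fun bullets row =>
        let parts := pyRowParts row
        if parts ≠ [] then bullets ++ [PySem.Str.join " " parts] else bullets) acc
      = acc ++ (rows.map (fun row => altBullet row pvFields)).filter (fun b => b ≠ "") := by
  induction rows with
  | nil => intro acc; simp
  | cons row rest ih =>
    intro acc
    have hb := bullet_eq row
    by_cases hp : pyRowParts row = []
    · have hb0 : altBullet row pvFields = "" := hb.2.mp hp
      rw [List.foldl_cons]
      rw [if_neg (not_not_intro hp), ih acc]
      simp [hb0]
    · have hb0 : altBullet row pvFields ≠ "" := fun h => hp (hb.2.mpr h)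
      rw [List.foldl_cons]
      rw [if_pos hp, ih, ← hb.1]
      simp [hb0]

-- ===== VERDICT (by name: the statement is the Claim_ definition above) =====
theorem format_dosing_bullets_py_spec : Claim_equal_format_dosing_bullets_py := by
  intro dosing_table _
  unfold Spec_format_dosing_bullets_py format_dosing_bullets_py format_dosing_bullets_py_alt
  simp only [fold_eq dosing_table [], List.nil_append]
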